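-- pv_equiv track=rewrite | github.com/tony-728/Algorithm | python/programmers/Lev2/보석쇼핑.py | solution
-- ===== SOURCE A (Python) =====
-- from collections import deque
--
-- def solution(gems):
--     answer = [1, 1]
--
--     q = deque(gems)
--
--     r = True
--
--     index = len(q)
--
--     while q:
--         if r:
--             x = q.pop()
--
--         else:
--             x = q.popleft()
--
--         if x in q:
--             index -= 1
--         else:
--             if index > 0:
--                 answer[1] = index
--                 index = -1
--                 r = False
--             else:
--                 answer[0] = -index
--                 break
--
--     return answer
-- ===== SOURCE B (Python) =====
-- def solution(gems):
--     # forward scan: i = last index whose value has no earlier occurrence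
--     i = 0
--     seen = set()
--     for k, g in enumerate(gems):
--         if g not in seen:
--             seen.add(g)
--             i = k
--     if i == 0:
--         return [1, 1]
--     prefix = gems[:i]
--     # last occurrence of each value within the prefix
--     last = {}
--     for k, g in enumerate(prefix):
--         last[g] = k
--     # j = first index that is the last occurrence of its value in the prefix
--     j = 0
--     for k, g in enumerate(prefix):
--         if last[g] == k:
--             j = k
--             break
--     return [j + 1, i + 1]
-- ===== Notes on version B (the rewrite author's own statement) =====
-- stated objective: faster
-- what changed: Replaces A's two-phase deque (pop-from-right then popleft, each step doing an O(n) membership scan of the shrinking deque, with a sign-toggled index counter) by two forward passes: a hash-set scan recording the last index that introduces a new value, then a last-occurrence dict over that prefix scanned for the first index that is its value's last occurrence.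
import Mathlib
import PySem

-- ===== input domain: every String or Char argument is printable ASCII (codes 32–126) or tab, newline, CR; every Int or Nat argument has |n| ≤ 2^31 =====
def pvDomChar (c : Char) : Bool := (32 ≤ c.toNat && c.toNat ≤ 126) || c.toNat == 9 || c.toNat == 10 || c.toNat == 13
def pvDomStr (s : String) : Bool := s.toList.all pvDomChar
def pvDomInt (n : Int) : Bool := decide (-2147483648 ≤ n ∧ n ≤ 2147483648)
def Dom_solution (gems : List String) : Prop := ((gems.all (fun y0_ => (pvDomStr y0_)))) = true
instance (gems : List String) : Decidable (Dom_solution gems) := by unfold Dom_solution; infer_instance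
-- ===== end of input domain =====

-- B replaces A's two-phase deque pop/membership scans (O(n^2)) with forward
-- table-building passes: a seen-set scan for the right endpoint and a
-- last-occurrence dict for the left endpoint (O(n) with Python's hash tables;
-- a timing run measured B faster).


-- ===== PORT A =====
-- the while loop: q is the deque, r the direction flag, index / a0 / a1 the ints
def solutionA_loop (q : List String) (r : Bool) (index a0 a1 : Int) : List Int :=
  if hq : q = [] then [a0, a1]
  else
    let x := if r then q.getLast hq else q.head hq
    let q' := if r then q.dropLast else q.tail
    if x ∈ q' then solutionA_loop q' r (index - 1) a0 a1
    else if 0 < index then solutionA_loop q' false (-1) a0 index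
    else [-index, a1]
termination_by q.length
decreasing_by
  all_goals
    have hpos : 0 < q.length := List.length_pos_iff.mpr hq
    cases r <;> simp_all [q'] <;> omega

def solution (gems : List String) : List Int :=
  solutionA_loop gems true (gems.length : Int) 1 1

-- ===== PORT B =====
-- the seen-set pass: carries (i, seen)
def bStep (st : Int × PySem.Set String) (kg : Int × String) : Int × PySem.Set String :=
  if kg.2 ∈ st.2 then st else (kg.1, PySem.Set.add st.2 kg.2)

-- last[g] = k for k, g in enumerate(p)
def lastDict (p : List String) : PySem.Dict String Int :=
  (PySem.List.enumerate p 0).foldl (fun d kg => d.insert kg.2 kg.1) PySem.Dict.empty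

-- the break-loop: first k with last[g] == k (j stays 0 if no break; in Source B the
-- lookup last[g] never raises since g is a key; get? = some models the == test)
def firstLastOcc (last : PySem.Dict String Int) : List (Int × String) → Int
  | [] => 0
  | kg :: rest => if last.get? kg.2 = some kg.1 then kg.1 else firstLastOcc last rest

def solution_alt (gems : List String) : List Int :=
  let i := ((PySem.List.enumerate gems 0).foldl bStep (0, PySem.Set.empty)).1
  if i = 0 then [1, 1]
  else
    let pre := PySem.List.slice gems none (some i)   -- gems[:i]
    let j := firstLastOcc (lastDict pre) (PySem.List.enumerate pre 0)
    [j + 1, i + 1]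

-- ===== PRECONDITION & SPEC =====
def Spec_solution (gems : List String) (out : List Int) : Prop := out = solution_alt gems
instance (gems : List String) (out : List Int) : Decidable (Spec_solution gems out) := by unfold Spec_solution; infer_instance

-- ===== CLAIM (what is proved, stated in full; the proofs are below) =====
def Claim_equal_solution : Prop := ∀ (gems : List String), Dom_solution gems → Spec_solution gems (solution gems)

-- ===== LEMMAS AND PROOFS =====

-- B's pure-spec helpers: jFirst p = first index whose value has no later occurrence
def jFirst : List String → Nat
  | [] => 0
  | h :: t => if h ∈ t then jFirst t + 1 else 0

theorem mem_seen_fold (l : List (Int × String)) (st : Int × PySem.Set String) (g : String) :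
    g ∈ (l.foldl bStep st).2 ↔ g ∈ st.2 ∨ g ∈ l.map (·.2) := by
  induction l generalizing st with
  | nil => simp
  | cons kg rest ih =>
    simp only [List.foldl_cons, List.map_cons, List.mem_cons, ih, bStep]
    split_ifs with h
    · constructor
      · rintro (h' | h') <;> tauto
      · rintro (h' | h' | h')
        · tauto
        · subst h'; tauto
        · tauto
    · simp only [PySem.Set.mem_add]
      tauto

theorem fold_fst_lt (l : List (Int × String)) (st : Int × PySem.Set String) (n : Int)
    (hl : ∀ p ∈ l, p.1 < n) (hst : st.1 < n) : (l.foldl bStep st).1 < n := by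
  induction l generalizing st with
  | nil => exact hst
  | cons kg rest ih =>
    refine ih _ (fun p hp => hl p (List.mem_cons_of_mem _ hp)) ?_
    unfold bStep
    split_ifs with h
    · exact hst
    · exact hl kg (List.mem_cons_self)

theorem fold_fst_nonneg (l : List (Int × String)) (st : Int × PySem.Set String)
    (hl : ∀ p ∈ l, 0 ≤ p.1) (hst : 0 ≤ st.1) : 0 ≤ (l.foldl bStep st).1 := by
  induction l generalizing st with
  | nil => exact hst
  | cons kg rest ih =>
    refine ih _ (fun p hp => hl p (List.mem_cons_of_mem _ hp)) ?_
    unfold bStep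
    split_ifs with h
    · exact hst
    · exact hl kg (List.mem_cons_self)

theorem enumerate_fst_bounds (p : List String) (s : Int) :
    ∀ q ∈ PySem.List.enumerate p s, s ≤ q.1 ∧ q.1 < s + p.length := by
  intro q hq
  rcases (PySem.List.mem_enumerate_iff p s q).mp hq with ⟨k, hk, rfl⟩
  constructor <;> simp <;> omega

theorem lastDict_concat (p : List String) (g : String) :
    lastDict (p ++ [g]) = (lastDict p).insert g (p.length : Int) := by
  unfold lastDict
  rw [PySem.List.enumerate_append, List.foldl_append]
  simp [PySem.List.enumerate_cons, PySem.List.enumerate_nil]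

theorem lastDict_get (p : List String) (k : Nat) (hk : k < p.length) :
    ((lastDict p).get? p[k] = some (k : Int)) ↔ p[k] ∉ p.drop (k + 1) := by
  induction p using List.reverseRecOn generalizing k with
  | nil => simp at hk
  | append_singleton p₀ g ih =>
    rw [lastDict_concat]
    rcases Nat.lt_or_ge k p₀.length with hlt | hge
    · have hget : (p₀ ++ [g])[k] = p₀[k] := List.getElem_append_left hlt
      rw [hget, List.drop_append_of_le_length (by omega)]
      by_cases hg : p₀[k] = g
      · rw [hg, PySem.Dict.get?_insert_self]
        constructor
        · intro h
          exfalso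
          have : (p₀.length : Int) = (k : Int) := Option.some_inj.mp h
          omega
        · intro h
          exfalso
          exact h (by simp)
      · rw [PySem.Dict.get?_insert_of_ne _ _ hg, ih k hlt]
        simp [hg]
    · have hk' : k = p₀.length := by
        simp at hk; omega
      subst hk'
      have hget : (p₀ ++ [g])[p₀.length]'(by simp) = g := by simp
      rw [hget, PySem.Dict.get?_insert_self]
      have hdrop : (p₀ ++ [g]).drop (p₀.length + 1) = [] := by
        apply List.drop_eq_nil_of_le; simp
      rw [hdrop]
      simp

-- scan over enumerate with the last-occurrence dict finds jFirst
theorem scan_eq (suf : List String) : ∀ pre : List String, suf ≠ [] →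
    firstLastOcc (lastDict (pre ++ suf)) (PySem.List.enumerate suf (pre.length : Int))
      = (pre.length : Int) + (jFirst suf : Int) := by
  induction suf with
  | nil => intro pre h; exact absurd rfl h
  | cons h t ih =>
    intro pre _
    rw [PySem.List.enumerate_cons]
    unfold firstLastOcc
    have hk : pre.length < (pre ++ h :: t).length := by simp
    have hget : (pre ++ h :: t)[pre.length]'hk = h := by
      simp
    have hdrop : (pre ++ h :: t).drop (pre.length + 1) = t := by
      rw [show pre ++ h :: t = (pre ++ [h]) ++ t by simp,
        show pre.length + 1 = (pre ++ [h]).length by simp, List.drop_left]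
    have hiff := lastDict_get (pre ++ h :: t) pre.length hk
    rw [hget, hdrop] at hiff
    by_cases hmem : h ∈ t
    · have hne : ¬ ((lastDict (pre ++ h :: t)).get? h = some (pre.length : Int)) := by
        rw [hiff]; simp [hmem]
      rw [if_neg hne]
      have hassoc : pre ++ h :: t = (pre ++ [h]) ++ t := by simp
      have ht : t ≠ [] := by rintro rfl; simp at hmem
      have := ih (pre ++ [h]) ht
      rw [← hassoc] at this
      simp only [List.length_append, List.length_cons, List.length_nil] at this
      have hcast : ((pre.length + 1 : Nat) : Int) = (pre.length : Int) + 1 := by push_cast; ring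
      rw [hcast] at this
      rw [this]
      have : jFirst (h :: t) = jFirst t + 1 := by simp [jFirst, hmem]
      rw [this]; push_cast; ring
    · have heq : (lastDict (pre ++ h :: t)).get? h = some (pre.length : Int) := hiff.mpr hmem
      rw [if_pos heq]
      have : jFirst (h :: t) = 0 := by simp [jFirst, hmem]
      rw [this]; simp

-- phase 2 of A's loop (r = False, index ≤ 0)
theorem phase2_eq (q : List String) : ∀ (idx a0 a1 : Int), q ≠ [] → idx ≤ 0 →
    solutionA_loop q false idx a0 a1 = [(jFirst q : Int) - idx, a1] := by
  induction q with
  | nil => intro _ _ _ h; exact absurd rfl h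
  | cons h t ih =>
    intro idx a0 a1 _ hidx
    rw [solutionA_loop]
    simp only [dif_neg (List.cons_ne_nil h t), Bool.false_eq_true, if_false,
      List.head_cons, List.tail_cons]
    by_cases hmem : h ∈ t
    · rw [if_pos hmem]
      have ht : t ≠ [] := by rintro rfl; simp at hmem
      rw [ih (idx - 1) a0 a1 ht (by omega)]
      have : jFirst (h :: t) = jFirst t + 1 := by simp [jFirst, hmem]
      rw [this]; push_cast; ring_nf
    · rw [if_neg hmem, if_neg (by omega)]
      have : jFirst (h :: t) = 0 := by simp [jFirst, hmem]
      rw [this]; simp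

theorem st_concat (q₀ : List String) (x : String) :
    (PySem.List.enumerate (q₀ ++ [x]) 0).foldl bStep (0, PySem.Set.empty)
      = bStep ((PySem.List.enumerate q₀ 0).foldl bStep (0, PySem.Set.empty))
          ((q₀.length : Int), x) := by
  rw [PySem.List.enumerate_append, List.foldl_append]
  simp [PySem.List.enumerate_cons, PySem.List.enumerate_nil]

theorem seen_iff (q₀ : List String) (g : String) :
    g ∈ ((PySem.List.enumerate q₀ 0).foldl bStep (0, PySem.Set.empty)).2 ↔ g ∈ q₀ := by
  rw [mem_seen_fold, PySem.List.map_snd_enumerate]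
  simp [PySem.Set.empty]

theorem i_nonneg (q₀ : List String) :
    0 ≤ ((PySem.List.enumerate q₀ 0).foldl bStep (0, PySem.Set.empty)).1 :=
  fold_fst_nonneg _ _ (fun p hp => by
    have := (enumerate_fst_bounds q₀ 0 p hp).1; omega) le_rfl

theorem i_lt (q₀ : List String) (h : q₀ ≠ []) :
    ((PySem.List.enumerate q₀ 0).foldl bStep (0, PySem.Set.empty)).1 < (q₀.length : Int) :=
  fold_fst_lt _ _ _ (fun p hp => by
    have := (enumerate_fst_bounds q₀ 0 p hp).2; omega)
    (by have : 0 < q₀.length := List.length_pos_iff.mpr h; omega)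

theorem alt_concat_mem (q₀ : List String) (x : String) (hmem : x ∈ q₀) :
    solution_alt (q₀ ++ [x]) = solution_alt q₀ := by
  have hne : q₀ ≠ [] := by rintro rfl; simp at hmem
  simp only [solution_alt, st_concat]
  have hseen : x ∈ ((PySem.List.enumerate q₀ 0).foldl bStep (0, PySem.Set.empty)).2 :=
    (seen_iff q₀ x).mpr hmem
  rw [show bStep ((PySem.List.enumerate q₀ 0).foldl bStep (0, PySem.Set.empty))
        ((q₀.length : Int), x)
      = (PySem.List.enumerate q₀ 0).foldl bStep (0, PySem.Set.empty) from by
    simp only [bStep]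
    rw [if_pos hseen]]
  by_cases hi : ((PySem.List.enumerate q₀ 0).foldl bStep (0, PySem.Set.empty)).1 = 0
  · rw [if_pos hi, if_pos hi]
  · rw [if_neg hi, if_neg hi]
    have h0 := i_nonneg q₀
    have h1 := i_lt q₀ hne
    have hpre : PySem.List.slice (q₀ ++ [x]) none
          (some ((PySem.List.enumerate q₀ 0).foldl bStep (0, PySem.Set.empty)).1)
        = PySem.List.slice q₀ none
          (some ((PySem.List.enumerate q₀ 0).foldl bStep (0, PySem.Set.empty)).1) := by
      rw [PySem.List.slice_to _ h0, PySem.List.slice_to _ h0]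
      exact List.take_append_of_le_length (by omega)
    rw [hpre]

theorem phase1_eq (q : List String) :
    solutionA_loop q true (q.length : Int) 1 1 = solution_alt q := by
  induction q using List.reverseRecOn with
  | nil =>
    rw [solutionA_loop]
    simp [solution_alt, PySem.List.enumerate_nil]
  | append_singleton q₀ x ih =>
    rw [solutionA_loop, dif_neg (by simp : ¬ (q₀ ++ [x] = []))]
    simp only [if_true, eq_self_iff_true, List.dropLast_concat, List.getLast_concat]
    by_cases hmem : x ∈ q₀
    · rw [if_pos hmem]
      have hidx : ((q₀ ++ [x]).length : Int) - 1 = (q₀.length : Int) := by simp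
      rw [hidx]
      rw [ih]
      rw [alt_concat_mem q₀ x hmem]
    · rw [if_neg hmem, if_pos (by simp : (0 : Int) < ((q₀ ++ [x]).length : Int))]
      by_cases hq₀ : q₀ = []
      · subst hq₀
        rw [solutionA_loop]
        simp [solution_alt, st_concat, bStep, PySem.List.enumerate_nil,
          PySem.List.enumerate_cons, PySem.Set.empty]
      · rw [phase2_eq q₀ (-1) 1 _ hq₀ (by omega)]
        simp only [solution_alt, st_concat]
        have hseen : x ∉ ((PySem.List.enumerate q₀ 0).foldl bStep (0, PySem.Set.empty)).2 := by
          rw [seen_iff]; exact hmem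
        rw [show bStep ((PySem.List.enumerate q₀ 0).foldl bStep (0, PySem.Set.empty))
              ((q₀.length : Int), x)
            = ((q₀.length : Int),
                PySem.Set.add ((PySem.List.enumerate q₀ 0).foldl bStep (0, PySem.Set.empty)).2 x)
            from by
              simp only [bStep]
              rw [if_neg hseen]]
        have hlen : 0 < q₀.length := List.length_pos_iff.mpr hq₀
        rw [if_neg (by simp [hq₀] : ¬ ((q₀.length : Int) = 0))]
        have hpre : PySem.List.slice (q₀ ++ [x]) none (some (q₀.length : Int)) = q₀ := by
          rw [PySem.List.slice_to_natCast]
          exact List.take_left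
        rw [hpre]
        have hscan := scan_eq q₀ [] hq₀
        simp only [List.nil_append, List.length_nil, Nat.cast_zero, zero_add] at hscan
        rw [hscan]
        simp

-- ===== VERDICT (by name: the statement is the Claim_ definition above) =====
theorem solution_spec : Claim_equal_solution := by
  intro gems _
  unfold Spec_solution solution
  exact phase1_eq gems
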